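-- pv_equiv track=rewrite | github.com/amiller27/google-code-jam | ChinaGradTest/rationaltree.py | pq
-- ===== SOURCE A (Python) =====
-- def pq(row, column):
-- 	if row==1:
-- 		return 1, 1
-- 	if column%2:
-- 		parent = pq(row-1, (column-1)/2 + 1)
-- 		return parent[0], sum(parent)
-- 	else:
-- 		parent = pq(row-1, column/2)
-- 		return sum(parent), parent[1]
-- ===== SOURCE B (Python) =====
-- def pq(row, column):
--     # Bottom-up: record the parity path while walking to the root, then fold
--     # it back down from (1, 1).  Same values as the top-down recursion.
--     bits = []
--     r, c = row, column
--     while r > 1: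
--         bits.append(c % 2)
--         c = (c - 1) // 2 + 1 if c % 2 else c // 2
--         r -= 1
--     a, b = 1, 1
--     for bit in reversed(bits):
--         if bit:
--             a, b = a, a + b
--         else:
--             a, b = a + b, b
--     return a, b
-- ===== Notes on version B (the rewrite author's own statement) =====
-- stated objective: alternative
-- what changed: Replaces A's top-down recursion with an iterative walk that records the parity path to the root and then folds it back bottom-up from the root pair in an explicit loop.
import Mathlib
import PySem

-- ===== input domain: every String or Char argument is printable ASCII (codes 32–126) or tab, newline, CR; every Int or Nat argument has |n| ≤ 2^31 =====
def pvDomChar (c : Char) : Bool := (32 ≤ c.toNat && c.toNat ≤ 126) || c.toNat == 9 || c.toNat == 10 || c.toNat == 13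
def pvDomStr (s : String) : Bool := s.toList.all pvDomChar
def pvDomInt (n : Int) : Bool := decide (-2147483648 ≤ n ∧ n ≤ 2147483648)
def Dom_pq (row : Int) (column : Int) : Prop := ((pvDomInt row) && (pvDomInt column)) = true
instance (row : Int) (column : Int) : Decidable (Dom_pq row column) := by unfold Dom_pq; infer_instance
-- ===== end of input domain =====

-- B replaces A's top-down recursion by an iterative parity-path collection plus a
-- bottom-up fold from the root pair; same values, same O(row) cost (objective: alternative).


-- ===== PORT A =====
-- A's Python-3 '/' is float division, but on Dom the operands are even integers of
-- magnitude ≤ 2^31, so it is exact and equals floor division (ported as such).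
-- A recurses on row-1 down to the row==1 base case; the helper carries row-1 as a Nat.
def pqAux : Nat → Int → Int × Int
  | 0, _ => (1, 1)
  | n+1, c =>
    if PySem.Int.mod c 2 ≠ 0 then
      let parent := pqAux n (PySem.Int.floordiv (c - 1) 2 + 1)
      (parent.1, parent.1 + parent.2)
    else
      let parent := pqAux n (PySem.Int.floordiv c 2)
      (parent.1 + parent.2, parent.2)

def pq (row : Int) (column : Int) : Int × Int := pqAux (row - 1).toNat column

-- ===== PORT B =====
-- the while loop of Source B, as a tail-recursive accumulator loop: each iteration
-- conses column%2, so the finished accumulator is reversed(bits) — exactly the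
-- sequence Source B's for-loop then iterates over.
def pqBitsLoop : Nat → Int → List Int → List Int
  | 0, _, acc => acc
  | n+1, c, acc =>
    pqBitsLoop n (if PySem.Int.mod c 2 ≠ 0 then PySem.Int.floordiv (c - 1) 2 + 1
                  else PySem.Int.floordiv c 2)
      (PySem.Int.mod c 2 :: acc)

-- one step of Source B's for-loop body
def pqStep (ab : Int × Int) (bit : Int) : Int × Int :=
  if bit ≠ 0 then (ab.1, ab.1 + ab.2) else (ab.1 + ab.2, ab.2)

def pq_alt (row : Int) (column : Int) : Int × Int :=
  (pqBitsLoop (row - 1).toNat column []).foldl pqStep (1, 1)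

-- ===== PRECONDITION & SPEC =====
-- Pre_ excludes only row < 1, where A recurses past its base case forever and
-- raises RecursionError (no value is returned there).
def Pre_pq (row : Int) (column : Int) : Prop := 1 ≤ row
instance (row : Int) (column : Int) : Decidable (Pre_pq row column) := by unfold Pre_pq; infer_instance
def pvWitness_pq : Int × Int := (3, 2)

def Spec_pq (row : Int) (column : Int) (out : Int × Int) : Prop := out = pq_alt row column
instance (row : Int) (column : Int) (out : Int × Int) : Decidable (Spec_pq row column out) := by unfold Spec_pq; infer_instance

-- ===== CLAIM (what is proved, stated in full; the proofs are below) =====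
def Claim_equal_pq : Prop := ∀ (row : Int) (column : Int), Dom_pq row column → Pre_pq row column → Spec_pq row column (pq row column)

-- ===== LEMMAS AND PROOFS =====
-- proof-side helper: the descent-order parity path (Source B's `bits` list)
def pqBits : Nat → Int → List Int
  | 0, _ => []
  | n+1, c =>
    PySem.Int.mod c 2 ::
      pqBits n (if PySem.Int.mod c 2 ≠ 0 then PySem.Int.floordiv (c - 1) 2 + 1
                else PySem.Int.floordiv c 2)

theorem pqBitsLoop_eq (n : Nat) : ∀ (c : Int) (acc : List Int),
    pqBitsLoop n c acc = (pqBits n c).reverse ++ acc := by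
  induction n with
  | zero => intro c acc; simp [pqBitsLoop, pqBits]
  | succ n ih =>
    intro c acc
    simp [pqBitsLoop, pqBits, ih]

theorem pqBits_fold (n : Nat) : ∀ (c : Int),
    ((pqBits n c).reverse).foldl pqStep (1, 1) = pqAux n c := by
  induction n with
  | zero => intro c; simp [pqBits, pqAux]
  | succ n ih =>
    intro c
    simp only [pqBits, pqAux, pqStep, List.reverse_cons, List.foldl_append,
      List.foldl_cons, List.foldl_nil, ih]
    split_ifs <;> rfl

-- ===== VERDICT (by name: the statement is the Claim_ definition above) =====
theorem pq_spec : Claim_equal_pq := by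
  intro row column _ _
  unfold Spec_pq pq pq_alt
  rw [pqBitsLoop_eq, List.append_nil, pqBits_fold]
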